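-- pv_equiv track=rewrite | github.com/James-HoneyBadger/Time_Warp_Studio | time_warp/languages/logo.py | _parse_logo_commands
-- ===== SOURCE A (Python) =====
-- from typing import TYPE_CHECKING, List
--
-- def _parse_logo_commands(body: str) -> List[str]:
--     """Parse Logo procedure body into complete commands, handling brackets."""
--     commands = []
--     lines = body.split("\n")
--     i = 0
--     while i < len(lines):
--         line = lines[i].strip()
--         if not line:
--             i += 1
--             continue
--
--         # Check if this line starts a bracketed command
--         if "[" in line and "]" not in line:
--             # Multi-line bracketed command - collect until closing bracket
--             cmd_lines = [line]
--             bracket_count = line.count("[") - line.count("]")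
--             i += 1
--             while i < len(lines) and bracket_count > 0:
--                 next_line = lines[i].strip()
--                 cmd_lines.append(next_line)
--                 bracket_count += next_line.count("[") - next_line.count("]")
--                 i += 1
--             commands.append("\n".join(cmd_lines))
--         else:
--             # Single line command
--             commands.append(line)
--             i += 1
--
--     return commands
-- ===== SOURCE B (Python) =====
-- from typing import List
--
-- def _parse_logo_commands(body: str) -> List[str]:
--     """Single flat pass over the lines with a collecting buffer and bracket depth."""
--     commands: List[str] = []
--     buffer: List[str] = []
--     depth = 0
--     collecting = False
--     for raw in body.split("\n"):
--         line = raw.strip()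
--         if collecting:
--             buffer.append(line)
--             depth += line.count("[") - line.count("]")
--             if depth <= 0:
--                 commands.append("\n".join(buffer))
--                 buffer = []
--                 collecting = False
--         elif not line:
--             continue
--         elif "[" in line and "]" not in line:
--             buffer = [line]
--             depth = line.count("[") - line.count("]")
--             collecting = True
--         else:
--             commands.append(line)
--     if collecting:
--         commands.append("\n".join(buffer))
--     return commands
-- ===== Notes on version B (the rewrite author's own statement) =====
-- stated objective: simpler
-- what changed: Replaced A's index-driven while-loop with a nested inner collection loop by a single flat pass over the lines that maintains an explicit (buffer, depth, collecting) state and flushes the buffer when brackets balance or input ends.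
import Mathlib
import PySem

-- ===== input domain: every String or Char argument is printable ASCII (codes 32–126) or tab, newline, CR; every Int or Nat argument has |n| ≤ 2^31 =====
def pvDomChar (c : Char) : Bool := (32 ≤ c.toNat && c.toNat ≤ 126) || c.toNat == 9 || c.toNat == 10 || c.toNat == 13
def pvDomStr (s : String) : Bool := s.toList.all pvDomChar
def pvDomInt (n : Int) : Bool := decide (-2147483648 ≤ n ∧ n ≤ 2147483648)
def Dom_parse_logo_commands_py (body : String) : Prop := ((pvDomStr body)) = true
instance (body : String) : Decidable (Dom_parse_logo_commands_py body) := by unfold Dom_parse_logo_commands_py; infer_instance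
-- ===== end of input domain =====

-- B re-parses the body in ONE flat fold over the lines with an explicit (buffer, depth, collecting)
-- state instead of A's index-driven while-loop with a nested inner collection loop; same return value.

-- ===== PORT A =====
-- inner 'while i < len(lines) and bracket_count > 0' loop: returns (cmd_lines, remaining lines)
def pyCollect (lines : List String) (cmd : List String) (bc : Int) :
    List String × List String :=
  match lines with
  | [] => (cmd, [])
  | l :: rest =>
    if 0 < bc then
      let next_line := PySem.Str.strip l
      pyCollect rest (cmd ++ [next_line])
        (bc + ((PySem.Str.count next_line "[" : Int) - (PySem.Str.count next_line "]" : Int)))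
    else (cmd, l :: rest)

-- termination helper for pyMain: the inner loop never lengthens the remaining line list
theorem pyCollect_snd_length (lines : List String) :
    ∀ cmd bc, (pyCollect lines cmd bc).2.length ≤ lines.length := by
  induction lines with
  | nil => intro cmd bc; simp [pyCollect]
  | cons l rest ih =>
    intro cmd bc
    simp only [pyCollect]
    split
    · exact le_trans (ih _ _) (by simp)
    · simp

-- outer 'while i < len(lines)' loop of A
def pyMain (lines : List String) (commands : List String) : List String :=
  match lines with
  | [] => commands
  | l :: rest =>
    let line := PySem.Str.strip l
    if line = "" then pyMain rest commands
    else if PySem.Str.isIn "[" line && !(PySem.Str.isIn "]" line) then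
      let p := pyCollect rest [line]
        ((PySem.Str.count line "[" : Int) - (PySem.Str.count line "]" : Int))
      pyMain p.2 (commands ++ [PySem.Str.join "\n" p.1])
    else pyMain rest (commands ++ [line])
termination_by lines.length
decreasing_by
  · simp
  · exact Nat.lt_succ_of_le (pyCollect_snd_length _ _ _)
  · simp

def parse_logo_commands_py (body : String) : List String :=
  pyMain ((PySem.Str.split? body "\n").getD []) []

-- ===== PORT B =====
-- state: (commands, buffer, depth, collecting)
def altStep (st : List String × List String × Int × Bool) (raw : String) :
    List String × List String × Int × Bool :=
  match st with
  | (commands, buffer, depth, collecting) =>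
    let line := PySem.Str.strip raw
    if collecting then
      let buffer' := buffer ++ [line]
      let depth' := depth + ((PySem.Str.count line "[" : Int) - (PySem.Str.count line "]" : Int))
      if depth' ≤ 0 then (commands ++ [PySem.Str.join "\n" buffer'], [], depth', false)
      else (commands, buffer', depth', true)
    else if line = "" then (commands, buffer, depth, collecting)
    else if PySem.Str.isIn "[" line && !(PySem.Str.isIn "]" line) then
      (commands, [line],
        (PySem.Str.count line "[" : Int) - (PySem.Str.count line "]" : Int), true)
    else (commands ++ [line], buffer, depth, collecting)

-- 'if collecting: commands.append("\n".join(buffer))' after the loop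
def altFinish (st : List String × List String × Int × Bool) : List String :=
  if st.2.2.2 then st.1 ++ [PySem.Str.join "\n" st.2.1] else st.1

def parse_logo_commands_py_alt (body : String) : List String :=
  altFinish (((PySem.Str.split? body "\n").getD []).foldl altStep ([], [], 0, false))

-- ===== PRECONDITION & SPEC =====
def Spec_parse_logo_commands_py (body : String) (out : List String) : Prop := out = parse_logo_commands_py_alt body
instance (body : String) (out : List String) : Decidable (Spec_parse_logo_commands_py body out) := by unfold Spec_parse_logo_commands_py; infer_instance

-- ===== CLAIM (what is proved, stated in full; the proofs are below) =====
def Claim_equal_parse_logo_commands_py : Prop := ∀ (body : String), Dom_parse_logo_commands_py body → Spec_parse_logo_commands_py body (parse_logo_commands_py body)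

-- ===== LEMMAS AND PROOFS =====

-- 'line.count(c)' for a single character is the character count of the line
theorem count_go_singleton (c : Char) :
    ∀ (fuel : Nat) (s : List Char) (acc : Nat), s.length ≤ fuel →
      PySem.Chars.count.go [c] fuel s acc = acc + s.count c := by
  intro fuel
  induction fuel with
  | zero => intro s acc h; cases s with
    | nil => simp [PySem.Chars.count.go]
    | cons x t => simp at h
  | succ n ih =>
    intro s acc h
    cases s with
    | nil => simp [PySem.Chars.count.go]
    | cons x t =>
      simp only [PySem.Chars.count.go, List.isPrefixOf, List.length_cons] at *
      by_cases hc : c = x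
      · subst hc
        simp [ih t (acc + 1) (by omega)]
        omega
      · simp [hc, ih t acc (by omega), Ne.symm hc]

theorem count_singleton (c : Char) (t s : String) (ht : t.toList = [c]) :
    PySem.Str.count s t = s.toList.count c := by
  rw [PySem.Str.count_eq, ht]
  simp [PySem.Chars.count, count_go_singleton c s.length s.toList 0 (by simp)]

theorem isIn_singleton (c : Char) (t s : String) (ht : t.toList = [c]) :
    PySem.Str.isIn t s = true ↔ c ∈ s.toList := by
  rw [PySem.Str.isIn_eq, ht, PySem.Chars.isIn_iff_infix]
  constructor
  · intro h; exact h.sublist.subset (by simp)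
  · intro h
    obtain ⟨l1, l2, hl⟩ := List.append_of_mem h
    exact ⟨l1, l2, by rw [hl]; simp⟩

-- a line that contains '[' but not ']' has a positive bracket difference
theorem delta_pos (line : String)
    (h1 : PySem.Str.isIn "[" line = true) (h2 : PySem.Str.isIn "]" line = false) :
    0 < (PySem.Str.count line "[" : Int) - (PySem.Str.count line "]" : Int) := by
  have e1 : ("[" : String).toList = ['['] := by decide
  have e2 : ("]" : String).toList = [']'] := by decide
  rw [count_singleton '[' _ _ e1, count_singleton ']' _ _ e2]
  have m1 : '[' ∈ line.toList := (isIn_singleton '[' _ line e1).mp h1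
  have m2 : ']' ∉ line.toList := fun h => by
    rw [(isIn_singleton ']' _ line e2).mpr h] at h2; cases h2
  have c1 : 0 < line.toList.count '[' := List.count_pos_iff.mpr m1
  have c2 : line.toList.count ']' = 0 := List.count_eq_zero.mpr m2
  omega

-- the inner loop is a no-op once the bracket count is non-positive
theorem pyCollect_nonpos (lines : List String) (cmd : List String) (bc : Int)
    (h : bc ≤ 0) : pyCollect lines cmd bc = (cmd, lines) := by
  cases lines with
  | nil => simp [pyCollect]
  | cons l rest => simp [pyCollect, not_lt.mpr h]

-- main invariant: B's flat fold, flushed at the end, computes A's two nested loops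
theorem fold_eq_pyMain (lines : List String) :
    ∀ (commands buffer : List String) (depth : Int) (collecting : Bool),
      (collecting = true → 0 < depth) →
      altFinish (lines.foldl altStep (commands, buffer, depth, collecting)) =
        (if collecting then
          pyMain (pyCollect lines buffer depth).2
            (commands ++ [PySem.Str.join "\n" (pyCollect lines buffer depth).1])
        else pyMain lines commands) := by
  induction lines with
  | nil =>
    intro commands buffer depth collecting hinv
    cases collecting <;> simp [altFinish, pyCollect, pyMain]
  | cons l rest ih =>
    intro commands buffer depth collecting hinv
    rw [List.foldl_cons]
    cases collecting with
    | true =>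
      have hd := hinv rfl
      simp only [altStep, if_true]
      by_cases hle : depth + ((PySem.Str.count (PySem.Str.strip l) "[" : Int) -
          (PySem.Str.count (PySem.Str.strip l) "]" : Int)) ≤ 0
      · rw [if_pos hle, ih _ _ _ false (by simp)]
        simp only [if_false, Bool.false_eq_true]
        rw [show pyCollect (l :: rest) buffer depth
            = pyCollect rest (buffer ++ [PySem.Str.strip l])
                (depth + ((PySem.Str.count (PySem.Str.strip l) "[" : Int) -
                  (PySem.Str.count (PySem.Str.strip l) "]" : Int)))
          from by simp [pyCollect, hd]]
        rw [pyCollect_nonpos _ _ _ hle]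
      · rw [if_neg hle, ih _ _ _ true (fun _ => by omega)]
        simp only [if_true]
        rw [show pyCollect (l :: rest) buffer depth
            = pyCollect rest (buffer ++ [PySem.Str.strip l])
                (depth + ((PySem.Str.count (PySem.Str.strip l) "[" : Int) -
                  (PySem.Str.count (PySem.Str.strip l) "]" : Int)))
          from by simp [pyCollect, hd]]
    | false =>
      simp only [altStep, Bool.false_eq_true, if_false]
      rw [show pyMain (l :: rest) commands
          = (if PySem.Str.strip l = "" then pyMain rest commands
             else if PySem.Str.isIn "[" (PySem.Str.strip l) && !(PySem.Str.isIn "]" (PySem.Str.strip l)) then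
               pyMain (pyCollect rest [PySem.Str.strip l]
                   ((PySem.Str.count (PySem.Str.strip l) "[" : Int) -
                    (PySem.Str.count (PySem.Str.strip l) "]" : Int))).2
                 (commands ++ [PySem.Str.join "\n" (pyCollect rest [PySem.Str.strip l]
                   ((PySem.Str.count (PySem.Str.strip l) "[" : Int) -
                    (PySem.Str.count (PySem.Str.strip l) "]" : Int))).1])
             else pyMain rest (commands ++ [PySem.Str.strip l]))
        from by rw [pyMain]]
      by_cases he : PySem.Str.strip l = ""
      · rw [if_pos he, if_pos he, ih _ _ _ false (by simp)]
        simp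
      · rw [if_neg he, if_neg he]
        by_cases hb : (PySem.Str.isIn "[" (PySem.Str.strip l) &&
            !(PySem.Str.isIn "]" (PySem.Str.strip l))) = true
        · rw [if_pos hb, if_pos hb]
          have h1 : PySem.Str.isIn "[" (PySem.Str.strip l) = true := by
            simpa using (Bool.and_eq_true_iff.mp hb).1
          have h2 : PySem.Str.isIn "]" (PySem.Str.strip l) = false := by
            have := (Bool.and_eq_true_iff.mp hb).2; simpa using this
          rw [ih _ _ _ true (fun _ => delta_pos _ h1 h2)]
          simp
        · rw [if_neg hb, if_neg hb, ih _ _ _ false (by simp)]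
          simp

-- ===== VERDICT (by name: the statement is the Claim_ definition above) =====
theorem parse_logo_commands_py_spec : Claim_equal_parse_logo_commands_py := by
  intro body _
  unfold Spec_parse_logo_commands_py parse_logo_commands_py parse_logo_commands_py_alt
  rw [fold_eq_pyMain _ _ _ _ false (by simp)]
  simp
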